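-- pv_equiv track=rewrite | github.com/AntMouss/Novelties-detection-project | NLP_Module.py | exclusiveWordsPerTopics
-- ===== SOURCE A (Python) =====
-- def exclusiveWordsPerTopics(listOfSetOfWords):
--
--     listOfSetOfExclusiveWords = []
--     for i, setOfWords in enumerate(listOfSetOfWords):
--         listOfNoExclusiveWords = set()
--         for j in range(len(listOfSetOfWords)):
--             if i == j:
--                 pass
--             else:
--                 listOfNoExclusiveWords = listOfNoExclusiveWords.union(listOfSetOfWords[j])
--         listOfSetOfExclusiveWords.append(setOfWords.difference(listOfNoExclusiveWords))
--
--     return listOfSetOfExclusiveWords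
-- ===== SOURCE B (Python) =====
-- def exclusiveWordsPerTopics(listOfSetOfWords):
--     counts = {}
--     for setOfWords in listOfSetOfWords:
--         for w in setOfWords:
--             counts[w] = counts.get(w, 0) + 1
--     return [{w for w in setOfWords if counts[w] == 1}
--             for setOfWords in listOfSetOfWords]
-- ===== Notes on version B (the rewrite author's own statement) =====
-- stated objective: faster
-- what changed: Replaced the per-topic union of all other sets (quadratic in the number of sets) by one global word-count pass (each word counted once per set), keeping per set exactly the words whose count is 1.
import Mathlib
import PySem

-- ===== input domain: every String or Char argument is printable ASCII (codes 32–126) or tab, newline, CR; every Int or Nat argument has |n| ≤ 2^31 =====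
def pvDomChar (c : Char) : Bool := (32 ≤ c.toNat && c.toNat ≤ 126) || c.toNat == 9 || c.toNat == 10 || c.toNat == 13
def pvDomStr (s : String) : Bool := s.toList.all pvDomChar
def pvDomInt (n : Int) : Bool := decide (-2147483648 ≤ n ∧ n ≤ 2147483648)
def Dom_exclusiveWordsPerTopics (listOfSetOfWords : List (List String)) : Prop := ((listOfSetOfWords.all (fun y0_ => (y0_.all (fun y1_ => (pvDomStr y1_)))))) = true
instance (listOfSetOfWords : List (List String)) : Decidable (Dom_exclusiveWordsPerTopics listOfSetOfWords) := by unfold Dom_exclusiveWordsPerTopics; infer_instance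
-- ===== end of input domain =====

-- B replaces A's per-topic union of all other sets by one global word-count pass; measurably faster (asymptotic).

-- ===== PORT A =====
-- the inner loop of A: union of listOfSetOfWords[j] for j in range(len), j ≠ i
def pvNoExcl (l : List (List String)) (i : Int) : PySem.Set String :=
  (PySem.List.pyRange 0 l.length 1).foldl
    (fun acc j => if i = j then acc else PySem.Set.union acc (PySem.List.pyGetD l j []))
    PySem.Set.empty

def exclusiveWordsPerTopics (listOfSetOfWords : List (List String)) : List (List String) :=
  (PySem.List.enumerate listOfSetOfWords 0).foldl
    (fun out p => out ++ [PySem.Set.diff p.2 (pvNoExcl listOfSetOfWords p.1)])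
    []

-- ===== PORT B =====
def exclusiveWordsPerTopics_alt (listOfSetOfWords : List (List String)) : List (List String) :=
  let counts : PySem.Dict String Int :=
    listOfSetOfWords.foldl
      (fun d s => s.foldl (fun d w => d.insert w (d.getD w 0 + 1)) d)
      PySem.Dict.empty
  listOfSetOfWords.map (fun s => PySem.Set.ofList (s.filter (fun w => counts.getD w 0 == 1)))

-- ===== PRECONDITION & SPEC =====
-- The Python argument is a list of SETS; Pre_ says each inner list is a valid set
-- representation (no duplicate elements) — no Python list[set[str]] input lies outside it.
def Pre_exclusiveWordsPerTopics (listOfSetOfWords : List (List String)) : Prop :=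
  ∀ s ∈ listOfSetOfWords, s.Nodup
instance (listOfSetOfWords : List (List String)) : Decidable (Pre_exclusiveWordsPerTopics listOfSetOfWords) := by unfold Pre_exclusiveWordsPerTopics; infer_instance

def pvWitness_exclusiveWordsPerTopics : List (List String) := [["a", "b"], ["b", "c"], []]

def Spec_exclusiveWordsPerTopics (listOfSetOfWords : List (List String)) (out : List (List String)) : Prop := out = exclusiveWordsPerTopics_alt listOfSetOfWords
instance (listOfSetOfWords : List (List String)) (out : List (List String)) : Decidable (Spec_exclusiveWordsPerTopics listOfSetOfWords out) := by unfold Spec_exclusiveWordsPerTopics; infer_instance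

-- ===== CLAIM (what is proved, stated in full; the proofs are below) =====
def Claim_equal_exclusiveWordsPerTopics : Prop := ∀ (listOfSetOfWords : List (List String)), Dom_exclusiveWordsPerTopics listOfSetOfWords → Pre_exclusiveWordsPerTopics listOfSetOfWords → Spec_exclusiveWordsPerTopics listOfSetOfWords (exclusiveWordsPerTopics listOfSetOfWords)

-- ===== LEMMAS AND PROOFS =====

-- membership in A's accumulated union over an arbitrary index list
theorem mem_noExcl_foldl (l : List (List String)) (i : Int) (js : List Int)
    (acc : PySem.Set String) (w : String) :
    w ∈ js.foldl
        (fun acc j => if i = j then acc else PySem.Set.union acc (PySem.List.pyGetD l j []))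
        acc ↔ w ∈ acc ∨ ∃ j ∈ js, i ≠ j ∧ w ∈ PySem.List.pyGetD l j [] := by
  induction js generalizing acc with
  | nil => simp
  | cons j js ih =>
    simp only [List.foldl_cons, ih]
    by_cases h : i = j
    · simp [h]
    · simp [h, PySem.Set.mem_union]
      tauto

theorem mem_pvNoExcl (l : List (List String)) (i : Int) (w : String) :
    w ∈ pvNoExcl l i ↔ ∃ k : Nat, k < l.length ∧ i ≠ (k : Int) ∧ w ∈ l.getD k [] := by
  unfold pvNoExcl
  rw [mem_noExcl_foldl]
  simp only [PySem.Set.empty, List.not_mem_nil, false_or]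
  constructor
  · rintro ⟨j, hj, hne, hw⟩
    rw [PySem.List.mem_pyRange_one] at hj
    refine ⟨j.toNat, ?_, ?_, ?_⟩
    · omega
    · omega
    · have hcast : ((j.toNat : Int)) = j := by omega
      rw [← hcast, PySem.List.pyGetD_natCast] at hw
      exact hw
  · rintro ⟨k, hk, hne, hw⟩
    refine ⟨(k : Int), ?_, hne, ?_⟩
    · rw [PySem.List.mem_pyRange_one]; omega
    · rwa [PySem.List.pyGetD_natCast]

-- B's nested counting loop computes, for each word, its total number of occurrences
theorem counts_getD (l : List (List String)) (d : PySem.Dict String Int) (w : String) :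
    (l.foldl (fun d s => s.foldl (fun d w => d.insert w (d.getD w 0 + 1)) d) d).getD w 0
      = d.getD w 0 + ((l.map (fun s => s.count w)).sum : Int) := by
  induction l generalizing d with
  | nil => simp
  | cons s l ih =>
    simp only [List.foldl_cons, List.map_cons, List.sum_cons, ih,
      PySem.Dict.getD_foldl_insert_add_one]
    ring

-- with nodup inner lists, the count of w in s is 1 or 0 according to membership
theorem count_of_nodup (s : List String) (hs : s.Nodup) (w : String) :
    s.count w = if w ∈ s then 1 else 0 := by
  split_ifs with h
  · exact List.count_eq_one_of_mem hs h
  · exact List.count_eq_zero_of_not_mem h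

-- the key pointwise fact: for w in set number k, "w in no other set" ↔ "total count = 1"
theorem key_iff (l : List (List String)) (hnd : ∀ s ∈ l, s.Nodup)
    (k : Nat) (hk : k < l.length) (w : String) (hw : w ∈ l[k]) :
    (¬ ∃ j : Nat, j < l.length ∧ (k : Int) ≠ (j : Int) ∧ w ∈ l.getD j [])
      ↔ ((l.map (fun s => s.count w)).sum = 1) := by
  have hsum : ∀ (m : List (List String)), (∀ s ∈ m, s.Nodup) →
      (m.map (fun s => s.count w)).sum = m.countP (fun s => decide (w ∈ s)) := by
    intro m hm
    induction m with
    | nil => simp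
    | cons s m ih =>
      simp only [List.map_cons, List.sum_cons, List.countP_cons,
        count_of_nodup s (hm s List.mem_cons_self) w]
      rw [ih (fun t ht => hm t (List.mem_cons_of_mem _ ht))]
      by_cases h : w ∈ s <;> simp [h]; omega
  rw [hsum l hnd]
  have hperm : l.Perm (l[k] :: l.eraseIdx k) := (List.getElem_cons_eraseIdx_perm hk).symm
  rw [hperm.countP_eq, List.countP_cons_of_pos (pa := by simpa using hw)]
  have herase : (l.eraseIdx k).countP (fun s => decide (w ∈ s)) = 0
      ↔ ∀ s ∈ l.eraseIdx k, w ∉ s := by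
    rw [List.countP_eq_zero]
    simp
  constructor
  · intro hno
    have : (l.eraseIdx k).countP (fun s => decide (w ∈ s)) = 0 := by
      rw [herase]
      intro s hs hws
      rw [List.mem_eraseIdx_iff_getElem] at hs
      obtain ⟨j, hj, hjk, rfl⟩ := hs
      exact hno ⟨j, hj, by omega, by rw [List.getD_eq_getElem _ _ hj]; exact hws⟩
    omega
  · intro h1
    have h0 : (l.eraseIdx k).countP (fun s => decide (w ∈ s)) = 0 := by omega
    rw [herase] at h0
    rintro ⟨j, hj, hne, hwj⟩
    rw [List.getD_eq_getElem _ _ hj] at hwj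
    refine h0 l[j] ?_ hwj
    rw [List.mem_eraseIdx_iff_getElem]
    exact ⟨j, hj, by omega, rfl⟩

-- ===== VERDICT (by name: the statement is the Claim_ definition above) =====
theorem exclusiveWordsPerTopics_spec : Claim_equal_exclusiveWordsPerTopics := by
  intro l _ hpre
  unfold Spec_exclusiveWordsPerTopics exclusiveWordsPerTopics exclusiveWordsPerTopics_alt
  rw [PySem.List.foldl_append_singleton_eq_map, List.nil_append]
  apply List.ext_getElem
  · simp [PySem.List.length_enumerate]
  intro k hk1 hk2
  rw [List.getElem_map, List.getElem_map, PySem.List.getElem_enumerate]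
  have hk : k < l.length := by simpa [PySem.List.length_enumerate] using hk2
  simp only [Int.zero_add]
  -- both sides are filters over l[k]
  have hdiff : PySem.Set.diff l[k] (pvNoExcl l (k : Int))
      = l[k].filter (fun w => !(PySem.Set.contains (pvNoExcl l (k : Int)) w)) := rfl
  rw [hdiff]
  refine Eq.trans ?_ (PySem.Set.ofList_eq_self_of_nodup _
        ((hpre l[k] (l.getElem_mem hk)).filter _)).symm
  apply List.filter_congr
  intro w hw
  have hA : (!(pvNoExcl l (k : Int)).contains w)
      = decide (¬ ∃ j : Nat, j < l.length ∧ (k : Int) ≠ (j : Int) ∧ w ∈ l.getD j []) := by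
    by_cases hc : w ∈ pvNoExcl l (k : Int)
    · have h1 : (pvNoExcl l (k : Int)).contains w = true :=
        (PySem.Set.contains_iff _ _).mpr hc
      have h2 : (¬ ∃ j : Nat, j < l.length ∧ (k : Int) ≠ (j : Int) ∧ w ∈ l.getD j []) = False := by
        simp only [eq_iff_iff, iff_false, not_not]
        exact (mem_pvNoExcl l (k : Int) w).mp hc
      simp only [h1, h2, decide_false, Bool.not_true]
    · have h1 : (pvNoExcl l (k : Int)).contains w = false := by
        rw [← Bool.not_eq_true]
        intro hcontra
        exact hc ((PySem.Set.contains_iff _ _).mp hcontra)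
      have h2 : (¬ ∃ j : Nat, j < l.length ∧ (k : Int) ≠ (j : Int) ∧ w ∈ l.getD j []) = True := by
        simp only [eq_iff_iff, iff_true]
        intro hex
        exact hc ((mem_pvNoExcl l (k : Int) w).mpr hex)
      simp only [h1, h2, decide_true, Bool.not_false]
  rw [hA]
  have hcount := counts_getD l PySem.Dict.empty w
  simp only [PySem.Dict.getD_empty, Int.zero_add] at hcount
  rw [hcount, Bool.eq_iff_iff]
  simp only [decide_eq_true_eq, beq_iff_eq]
  have hcast : ∀ (m : List (List String)),
      (m.map (fun s => ((s.count w : Int)))).sum = (((m.map (fun s => s.count w)).sum : Nat) : Int) := by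
    intro m
    induction m with
    | nil => simp
    | cons s m ih => simp [ih]
  rw [hcast l, key_iff l hpre k hk w hw]
  omega
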